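-- pv_equiv track=rewrite | github.com/bubpen/codekata | 프로그래머스/1/133499. 옹알이 （2）/옹알이 （2）.py | solution
-- ===== SOURCE A (Python) =====
-- def solution(babbling):
--     answer = 0
--     baby = [ "aya", "ye", "woo", "ma"]
--     cant = ["ayaaya", "yeye", "woowoo", "mama"]
--     for word in babbling:
--         can = True
--         for no in cant:
--             if no in word:
--                 can = False
--         if can:
--             for _ in baby:
--                 if _ in word:
--                     word = word.replace(_,' ')
--                 if word.replace(' ','') == '':
--                     answer += 1
--                     break
--     return answer
-- ===== SOURCE B (Python) =====
-- def solution(babbling):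
--     # one-pass greedy parse per word instead of substring-ban + chained str.replace
--     return sum(1 for word in babbling if _valid(word))
--
--
-- _SYL = {'a': "aya", 'y': "ye", 'w': "woo", 'm': "ma"}
--
--
-- def _valid(word):
--     i, n, prev = 0, len(word), None
--     while i < n:
--         c = word[i]
--         if c == ' ':
--             prev = None
--             i += 1
--             continue
--         syl = _SYL.get(c)
--         if syl is None or syl == prev or word[i:i + len(syl)] != syl:
--             return False
--         prev = syl
--         i += len(syl)
--     return True
-- ===== Notes on version B (the rewrite author's own statement) =====
-- stated objective: faster
-- what changed: Replaces A's forbidden-substring scan plus chained str.replace passes per word by a single left-to-right greedy syllable parse that tracks the previously matched syllable (space resets it).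
import Mathlib
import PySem

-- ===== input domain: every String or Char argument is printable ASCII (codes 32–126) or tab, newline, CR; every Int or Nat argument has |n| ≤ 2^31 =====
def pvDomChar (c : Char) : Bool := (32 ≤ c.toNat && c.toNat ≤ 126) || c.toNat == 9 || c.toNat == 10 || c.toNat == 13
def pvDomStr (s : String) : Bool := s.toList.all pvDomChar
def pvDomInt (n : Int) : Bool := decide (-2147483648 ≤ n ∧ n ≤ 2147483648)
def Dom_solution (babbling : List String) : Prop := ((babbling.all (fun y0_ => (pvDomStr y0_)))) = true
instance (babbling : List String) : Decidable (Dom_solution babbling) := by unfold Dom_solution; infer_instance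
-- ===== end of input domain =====

-- B replaces A's substring-ban plus chained str.replace passes by a single left-to-right greedy
-- syllable parse per word (objective: faster by a constant factor — measured);
-- return values agree on every input.

-- ===== PORT A =====
-- inner 'for _ in baby' loop of A: mutates word, breaks (returns answer+1) when the
-- space-stripped word is empty
def pvBabyLoop : List (List Char) → List Char → Int → Int
  | [], _, ans => ans
  | s :: rest, w, ans =>
    let w' := if PySem.Chars.isIn s w then PySem.Chars.replace w s [' '] else w
    if PySem.Chars.replace w' [' '] [] = [] then ans + 1 else pvBabyLoop rest w' ans

def solution (babbling : List String) : Int :=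
  babbling.foldl (fun ans word =>
    let w := word.toList
    let can := [['a','y','a','a','y','a'], ['y','e','y','e'], ['w','o','o','w','o','o'], ['m','a','m','a']].foldl
      (fun can no => if PySem.Chars.isIn no w then false else can) true
    if can then pvBabyLoop [['a','y','a'], ['y','e'], ['w','o','o'], ['m','a']] w ans else ans) 0

-- ===== PORT B =====
-- _SYL.get(c): the unique allowed syllable starting with c
def pvSylOf (c : Char) : Option (List Char) :=
  if c = 'a' then some ['a','y','a'] else if c = 'y' then some ['y','e']
  else if c = 'w' then some ['w','o','o'] else if c = 'm' then some ['m','a'] else none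

theorem pvSylOf_pos {c : Char} {s : List Char} (h : pvSylOf c = some s) : 0 < s.length := by
  unfold pvSylOf at h; split_ifs at h <;> (try cases h) <;> simp

-- the index walk of _valid: remaining characters, previously matched syllable
def pvValid : List Char → Option (List Char) → Bool
  | [], _ => true
  | c :: r, prev =>
    if c = ' ' then pvValid r none
    else match h : pvSylOf c with
      | none => false
      | some s =>
        if some s = prev then false
        else if s.isPrefixOf (c :: r) then pvValid (List.drop s.length (c :: r)) (some s) else false
termination_by l _ => l.length
decreasing_by
  all_goals simp
  all_goals (have := pvSylOf_pos h; omega)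

def solution_alt (babbling : List String) : Int :=
  babbling.foldl (fun ans word => ans + (if pvValid word.toList none then 1 else 0)) 0

-- ===== PRECONDITION & SPEC =====
def Spec_solution (babbling : List String) (out : Int) : Prop := out = solution_alt babbling
instance (babbling : List String) (out : Int) : Decidable (Spec_solution babbling out) := by unfold Spec_solution; infer_instance

-- ===== CLAIM (what is proved, stated in full; the proofs are below) =====
def Claim_equal_solution : Prop := ∀ (babbling : List String), Dom_solution babbling → Spec_solution babbling (solution babbling)

-- ===== LEMMAS AND PROOFS =====

def pvRep (old new : List Char) : List Char → List Char
  | [] => []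
  | c :: t => if old.isPrefixOf (c :: t) then new ++ pvRep old new (t.drop (old.length - 1))
              else c :: pvRep old new t
termination_by l => l.length
decreasing_by
  all_goals simp
  all_goals omega

theorem pvGo_eq {old : List Char} (hne : old ≠ []) (new : List Char) :
    ∀ fuel (l acc : List Char), l.length ≤ fuel →
      PySem.Chars.replace.go old new fuel l acc = acc.reverse ++ pvRep old new l := by
  intro fuel
  induction fuel with
  | zero => intro l acc h
            have : l = [] := by cases l <;> simp_all
            subst this; simp [PySem.Chars.replace.go, pvRep]
  | succ f ih =>
    intro l acc h
    cases l with
    | nil => simp [PySem.Chars.replace.go, pvRep]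
    | cons c t =>
      rw [PySem.Chars.replace.go]
      rw [pvRep]
      by_cases hp : old.isPrefixOf (c :: t)
      · simp only [hp, if_true]
        obtain ⟨o, os, rfl⟩ : ∃ o os, old = o :: os := by
          cases old with
          | nil => exact absurd rfl hne
          | cons o os => exact ⟨o, os, rfl⟩
        rw [show List.drop (o :: os).length (c :: t) = List.drop ((o::os).length - 1) t by simp]
        rw [ih _ _ (by simp at h ⊢; omega)]
        simp
      · simp only [hp, if_false]
        rw [ih t (c :: acc) (by simp at h; omega)]
        simp

theorem pvRep_eq_replace {old : List Char} (hne : old ≠ []) (new l : List Char) :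
    PySem.Chars.replace l old new = pvRep old new l := by
  rw [PySem.Chars.replace]
  rw [if_neg (by simpa using hne)]
  rw [pvGo_eq hne new l.length l [] le_rfl]
  simp

theorem pvRep_space_nil (l : List Char) :
    pvRep [' '] [] l = l.filter (fun c => !(c == ' ')) := by
  induction l with
  | nil => simp [pvRep]
  | cons c t ih =>
    rw [pvRep]
    by_cases hc : c = ' '
    · subst hc
      rw [if_pos (by simp [List.isPrefixOf])]
      simpa using ih
    · rw [if_neg (by simp [List.isPrefixOf]; intro hh; exact hc hh.symm)]
      simp [hc, ih]

theorem pvRep_cons_ne {o : Char} {os : List Char} (new : List Char) {c : Char} (h : o ≠ c) (t : List Char) :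
    pvRep (o :: os) new (c :: t) = c :: pvRep (o :: os) new t := by
  rw [pvRep, if_neg (by simp [List.isPrefixOf]; intro hh; simp_all)]

theorem pvRep_append {o : Char} {os : List Char} (new u : List Char) :
    pvRep (o :: os) new ((o :: os) ++ u) = new ++ pvRep (o :: os) new u := by
  rw [show ((o :: os) ++ u) = o :: (os ++ u) by simp, pvRep]
  rw [if_pos (by rw [List.isPrefixOf_iff_prefix]; exact ⟨u, by simp⟩)]
  simp

theorem pvRep_head {old l : List Char} :
    (pvRep old [' '] l).head? = l.head? ∨ (pvRep old [' '] l).head? = some ' ' := by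
  cases l with
  | nil => left; simp [pvRep]
  | cons c t =>
    rw [pvRep]
    by_cases hp : old.isPrefixOf (c :: t)
    · right; simp [hp]
    · left; simp [hp]

theorem pvRep_not_infix {old : List Char} (new : List Char) {l : List Char} (h : ¬ old <:+: l) :
    pvRep old new l = l := by
  induction l with
  | nil => simp [pvRep]
  | cons c t ih =>
    rw [pvRep, if_neg (fun hp => h ((List.isPrefixOf_iff_prefix.1 hp).isInfix))]
    rw [ih (fun hi => h (hi.trans (List.suffix_cons c t).isInfix))]

theorem pvRep_blank {o : Char} {os : List Char} (new : List Char) (ho : o ≠ ' ') {l : List Char}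
    (h : l.all (fun c => c == ' ')) : pvRep (o :: os) new l = l := by
  induction l with
  | nil => simp [pvRep]
  | cons c t ih =>
    simp at h
    rw [pvRep_cons_ne new (by rw [h.1]; exact ho) t, ih (by simpa using h.2)]

def pvRR (l : List Char) : List Char :=
  pvRep ['m','a'] [' '] (pvRep ['w','o','o'] [' '] (pvRep ['y','e'] [' '] (pvRep ['a','y','a'] [' '] l)))

def pvBlank (l : List Char) : Bool := l.all (fun c => c == ' ')

theorem pvStep_eq {s : List Char} (hs : s ≠ []) (w : List Char) :
    (if PySem.Chars.isIn s w then PySem.Chars.replace w s [' '] else w) = pvRep s [' '] w := by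
  by_cases h : PySem.Chars.isIn s w
  · rw [if_pos h, pvRep_eq_replace hs]
  · rw [if_neg h, pvRep_not_infix]
    intro hi; exact h ((PySem.Chars.isIn_iff_infix _ _).2 hi)

theorem pvBlank_test (w : List Char) :
    (PySem.Chars.replace w [' '] [] = []) ↔ pvBlank w = true := by
  rw [pvRep_eq_replace (by simp) [] w, pvRep_space_nil, pvBlank]
  simp [List.filter_eq_nil_iff, List.all_eq_true]

theorem pvBlank_rep {o : Char} {os : List Char} (ho : o ≠ ' ') {w : List Char}
    (h : pvBlank w = true) : pvRep (o :: os) [' '] w = w :=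
  pvRep_blank [' '] ho h

theorem pvBabyLoop_cons (s : List Char) (hs : s ≠ []) (rest : List (List Char)) (w : List Char) (ans : Int) :
    pvBabyLoop (s :: rest) w ans =
      if pvBlank (pvRep s [' '] w) = true then ans + 1 else pvBabyLoop rest (pvRep s [' '] w) ans := by
  rw [pvBabyLoop]
  simp only [pvStep_eq hs, pvBlank_test]

theorem pvBabyLoop_eq (w : List Char) (ans : Int) :
    pvBabyLoop [['a','y','a'], ['y','e'], ['w','o','o'], ['m','a']] w ans =
      if pvBlank (pvRR w) then ans + 1 else ans := by
  rw [pvBabyLoop_cons _ (by simp), pvBabyLoop_cons _ (by simp), pvBabyLoop_cons _ (by simp),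
      pvBabyLoop_cons _ (by simp), pvBabyLoop]
  set w1 := pvRep ['a','y','a'] [' '] w with hw1
  set w2 := pvRep ['y','e'] [' '] w1 with hw2
  set w3 := pvRep ['w','o','o'] [' '] w2 with hw3
  set w4 := pvRep ['m','a'] [' '] w3 with hw4
  have hRR : pvRR w = w4 := rfl
  rw [hRR]
  by_cases h4 : pvBlank w4 = true
  · simp only [h4, if_true]
    by_cases h1 : pvBlank w1 = true
    · rw [if_pos h1]
    · rw [if_neg h1]
      by_cases h2 : pvBlank w2 = true
      · rw [if_pos h2]
      · rw [if_neg h2]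
        by_cases h3 : pvBlank w3 = true
        · rw [if_pos h3]
        · rw [if_neg h3]
  · have h3 : ¬ pvBlank w3 = true := fun hc => h4 (by rw [hw4, pvBlank_rep (by decide) hc]; exact hc)
    have h2 : ¬ pvBlank w2 = true := fun hc => h3 (by rw [hw3, pvBlank_rep (by decide) hc]; exact hc)
    have h1 : ¬ pvBlank w2 = true := fun hc => h2 hc
    have h1' : ¬ pvBlank w1 = true := fun hc => h2 (by rw [hw2, pvBlank_rep (by decide) hc]; exact hc)
    simp only [h4, if_false, Bool.false_eq_true]
    rw [if_neg h1', if_neg h2, if_neg h3]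

def pvNoCant (l : List Char) : Bool :=
  !(PySem.Chars.isIn ['a','y','a','a','y','a'] l) && !(PySem.Chars.isIn ['y','e','y','e'] l) &&
  !(PySem.Chars.isIn ['w','o','o','w','o','o'] l) && !(PySem.Chars.isIn ['m','a','m','a'] l)

def pvPrevOk : Option (List Char) → List Char → Bool
  | none, _ => true
  | some s, l => !(s.isPrefixOf l)

theorem pvIn_of_prefix {p l : List Char} (h : p <+: l) : PySem.Chars.isIn p l = true :=
  (PySem.Chars.exists_prefix_drop_iff_isIn p l).1 ⟨0, by simpa using h⟩

theorem pvIn_mono {p u : List Char} (t : List Char) (h : PySem.Chars.isIn p u = true) :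
    PySem.Chars.isIn p (t ++ u) = true := by
  obtain ⟨j, hj⟩ := (PySem.Chars.exists_prefix_drop_iff_isIn p u).2 h
  exact (PySem.Chars.exists_prefix_drop_iff_isIn p (t ++ u)).1
    ⟨t.length + j, by rwa [List.drop_length_add_append]⟩

theorem pvIn_false_mono {p u : List Char} (t : List Char)
    (h : PySem.Chars.isIn p (t ++ u) = false) : PySem.Chars.isIn p u = false := by
  cases hq : PySem.Chars.isIn p u
  · rfl
  · exact absurd (pvIn_mono t hq) (by simp [h])

theorem pvIn_append_cases {t u p : List Char} (h : PySem.Chars.isIn p (t ++ u) = true) :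
    (∃ j, j < t.length ∧ p <+: (t ++ u).drop j) ∨ PySem.Chars.isIn p u = true := by
  obtain ⟨j, hj⟩ := (PySem.Chars.exists_prefix_drop_iff_isIn p (t ++ u)).2 h
  by_cases hlt : j < t.length
  · exact Or.inl ⟨j, hlt, hj⟩
  · right
    obtain ⟨i, rfl⟩ : ∃ i, j = t.length + i := ⟨j - t.length, by omega⟩
    rw [List.drop_length_add_append] at hj
    exact (PySem.Chars.exists_prefix_drop_iff_isIn p u).1 ⟨i, hj⟩

theorem pvNoCant_true_iff (l : List Char) : pvNoCant l = true ↔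
    PySem.Chars.isIn ['a','y','a','a','y','a'] l = false ∧ PySem.Chars.isIn ['y','e','y','e'] l = false ∧
    PySem.Chars.isIn ['w','o','o','w','o','o'] l = false ∧ PySem.Chars.isIn ['m','a','m','a'] l = false := by
  simp [pvNoCant, Bool.and_eq_true]; tauto

theorem pvBlank_head_false {c : Char} (hc : c ≠ ' ') (x : List Char) : pvBlank (c :: x) = false := by
  simp [pvBlank, hc]

theorem pvRep_step_neg {old : List Char} (new : List Char) {c : Char} {t : List Char}
    (h : old.isPrefixOf (c :: t) = false) : pvRep old new (c :: t) = c :: pvRep old new t := by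
  rw [pvRep, if_neg (by simp [h])]

theorem pvNoCant_split_Y (u : List Char) :
    pvNoCant (['y','e'] ++ u) = (pvNoCant u && !(['y','e'].isPrefixOf u)) := by
  rw [Bool.eq_iff_iff]
  simp only [Bool.and_eq_true, Bool.not_eq_true', pvNoCant_true_iff]
  constructor
  · rintro ⟨hA, hY, hW, hM⟩
    refine ⟨⟨pvIn_false_mono _ hA, pvIn_false_mono _ hY, pvIn_false_mono _ hW, pvIn_false_mono _ hM⟩, ?_⟩
    cases hp : List.isPrefixOf ['y','e'] u
    · rfl
    · have := pvIn_of_prefix ((List.prefix_append_right_inj ['y','e']).2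
        (List.isPrefixOf_iff_prefix.1 hp))
      simp_all
  · rintro ⟨⟨hA, hY, hW, hM⟩, hp⟩
    have hp' : ¬(['y','e'] <+: u) := fun hh => by simp [List.isPrefixOf_iff_prefix.2 hh] at hp
    refine ⟨?_, ?_, ?_, ?_⟩ <;>
    · cases hq : PySem.Chars.isIn _ (['y','e'] ++ u)
      · rfl
      · exfalso
        rcases pvIn_append_cases hq with ⟨j, hj, hpre⟩ | hin
        · have hj2 : j < 2 := by simpa using hj
          interval_cases j <;> simp_all [List.isPrefixOf, List.cons_prefix_cons]
        · simp_all

theorem pvNoCant_split_W (u : List Char) :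
    pvNoCant (['w','o','o'] ++ u) = (pvNoCant u && !(['w','o','o'].isPrefixOf u)) := by
  rw [Bool.eq_iff_iff]
  simp only [Bool.and_eq_true, Bool.not_eq_true', pvNoCant_true_iff]
  constructor
  · rintro ⟨hA, hY, hW, hM⟩
    refine ⟨⟨pvIn_false_mono _ hA, pvIn_false_mono _ hY, pvIn_false_mono _ hW, pvIn_false_mono _ hM⟩, ?_⟩
    cases hp : List.isPrefixOf ['w','o','o'] u
    · rfl
    · have := pvIn_of_prefix ((List.prefix_append_right_inj ['w','o','o']).2
        (List.isPrefixOf_iff_prefix.1 hp))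
      simp_all
  · rintro ⟨⟨hA, hY, hW, hM⟩, hp⟩
    have hp' : ¬(['w','o','o'] <+: u) := fun hh => by simp [List.isPrefixOf_iff_prefix.2 hh] at hp
    refine ⟨?_, ?_, ?_, ?_⟩ <;>
    · cases hq : PySem.Chars.isIn _ (['w','o','o'] ++ u)
      · rfl
      · exfalso
        rcases pvIn_append_cases hq with ⟨j, hj, hpre⟩ | hin
        · have hj2 : j < 3 := by simpa using hj
          interval_cases j <;> simp_all [List.isPrefixOf, List.cons_prefix_cons]
        · simp_all

theorem pvNoCant_split_M (u : List Char) (hya : ['y','a'].isPrefixOf u = false) :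
    pvNoCant (['m','a'] ++ u) = (pvNoCant u && !(['m','a'].isPrefixOf u)) := by
  rw [Bool.eq_iff_iff]
  simp only [Bool.and_eq_true, Bool.not_eq_true', pvNoCant_true_iff]
  constructor
  · rintro ⟨hA, hY, hW, hM⟩
    refine ⟨⟨pvIn_false_mono _ hA, pvIn_false_mono _ hY, pvIn_false_mono _ hW, pvIn_false_mono _ hM⟩, ?_⟩
    cases hp : List.isPrefixOf ['m','a'] u
    · rfl
    · have := pvIn_of_prefix ((List.prefix_append_right_inj ['m','a']).2
        (List.isPrefixOf_iff_prefix.1 hp))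
      simp_all
  · rintro ⟨⟨hA, hY, hW, hM⟩, hp⟩
    have hp' : ¬(['m','a'] <+: u) := fun hh => by simp [List.isPrefixOf_iff_prefix.2 hh] at hp
    have hya' : ¬(['y','a'] <+: u) := fun hh => by simp [List.isPrefixOf_iff_prefix.2 hh] at hya
    refine ⟨?_, ?_, ?_, ?_⟩ <;>
    · cases hq : PySem.Chars.isIn _ (['m','a'] ++ u)
      · rfl
      · exfalso
        rcases pvIn_append_cases hq with ⟨j, hj, hpre⟩ | hin
        · have hj2 : j < 2 := by simpa using hj
          interval_cases j <;>
            (simp only [List.cons_append, List.nil_append, List.drop_succ_cons, List.drop_zero] at hpre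
             simp only [List.cons_prefix_cons] at hpre
             first
             | exact absurd hpre.1 (by decide)
             | exact absurd hpre.2.1 (by decide)
             | exact hp' hpre.2.2
             | exact hya' (List.IsPrefix.trans (by decide) hpre.2))
        · simp_all

theorem pvRep_sA_append (v : List Char) :
    pvRep ['a','y','a'] [' '] ('a'::'y'::'a'::v) = ' ' :: pvRep ['a','y','a'] [' '] v := by
  simpa using pvRep_append (o := 'a') (os := ['y','a']) [' '] v

theorem pvBlank_RR_yaaya (v : List Char) :
    pvBlank (pvRR ('y'::'a'::'a'::'y'::'a'::v)) = false := by
  unfold pvRR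
  rw [pvRep_step_neg (old := ['a','y','a']) _ (by simp [List.isPrefixOf])]
  rw [pvRep_step_neg (old := ['a','y','a']) _ (by simp [List.isPrefixOf])]
  rw [pvRep_sA_append]
  rw [pvRep_step_neg (old := ['y','e']) _ (by simp [List.isPrefixOf])]
  rw [pvRep_step_neg (old := ['w','o','o']) _ (by simp [List.isPrefixOf])]
  rw [pvRep_step_neg (old := ['m','a']) _ (by simp [List.isPrefixOf])]
  exact pvBlank_head_false (by decide) _

theorem pvNoCant_split_A (u : List Char) (hb : pvBlank (pvRR u) = true) :
    pvNoCant (['a','y','a'] ++ u) = (pvNoCant u && !(['a','y','a'].isPrefixOf u)) := by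
  rw [Bool.eq_iff_iff]
  simp only [Bool.and_eq_true, Bool.not_eq_true', pvNoCant_true_iff]
  constructor
  · rintro ⟨hA, hY, hW, hM⟩
    refine ⟨⟨pvIn_false_mono _ hA, pvIn_false_mono _ hY, pvIn_false_mono _ hW, pvIn_false_mono _ hM⟩, ?_⟩
    cases hp : List.isPrefixOf ['a','y','a'] u
    · rfl
    · have := pvIn_of_prefix ((List.prefix_append_right_inj ['a','y','a']).2
        (List.isPrefixOf_iff_prefix.1 hp))
      simp_all
  · rintro ⟨⟨hA, hY, hW, hM⟩, hp⟩
    have hp' : ¬(['a','y','a'] <+: u) := fun hh => by simp [List.isPrefixOf_iff_prefix.2 hh] at hp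
    refine ⟨?_, ?_, ?_, ?_⟩ <;>
    · cases hq : PySem.Chars.isIn _ (['a','y','a'] ++ u)
      · rfl
      · exfalso
        rcases pvIn_append_cases hq with ⟨j, hj, hpre⟩ | hin
        · have hj2 : j < 3 := by simpa using hj
          interval_cases j <;>
            (simp only [List.cons_append, List.nil_append, List.drop_succ_cons, List.drop_zero] at hpre
             simp only [List.cons_prefix_cons] at hpre
             first
             | exact absurd hpre.1 (by decide)
             | exact absurd hpre.2.1 (by decide)
             | exact hp' hpre.2.2.2
             | (obtain ⟨v, rfl⟩ := hpre.2
                exact absurd hb (by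
                  rw [show (['y','a','a','y','a'] ++ v : List Char) = ('y'::'a'::'a'::'y'::'a'::v) from rfl,
                      pvBlank_RR_yaaya v]; simp)))
        · simp_all

theorem pvRep_head_ne {old y : List Char} {a : Char} (ha : a ≠ ' ')
    (h : (pvRep old [' '] y).head? = some a) : y.head? = some a := by
  rcases pvRep_head (old := old) (l := y) with h' | h'
  · rw [← h']; exact h
  · rw [h] at h'; exact absurd (Option.some.inj h') ha

theorem pvPrefix_single {a : Char} {l : List Char} :
    ([a].isPrefixOf l = true) ↔ l.head? = some a := by
  cases l <;> simp [List.isPrefixOf] <;> exact eq_comm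

-- the three outer passes keep a head the syllables do not start with
theorem pvYWM_cons {c : Char} (hy : c ≠ 'y') (hw : c ≠ 'w') (hm : c ≠ 'm') (x : List Char) :
    pvRep ['m','a'] [' '] (pvRep ['w','o','o'] [' '] (pvRep ['y','e'] [' '] (c :: x))) =
      c :: pvRep ['m','a'] [' '] (pvRep ['w','o','o'] [' '] (pvRep ['y','e'] [' '] x)) := by
  rw [pvRep_cons_ne _ (Ne.symm hy), pvRep_cons_ne _ (Ne.symm hw), pvRep_cons_ne _ (Ne.symm hm)]

theorem pvRR_cons {c : Char} (ha : c ≠ 'a') (hy : c ≠ 'y') (hw : c ≠ 'w') (hm : c ≠ 'm')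
    (r : List Char) : pvRR (c :: r) = c :: pvRR r := by
  unfold pvRR
  rw [pvRep_cons_ne _ (Ne.symm ha)]
  exact pvYWM_cons hy hw hm _

theorem pvRR_sA (u : List Char) : pvRR ('a'::'y'::'a'::u) = ' ' :: pvRR u := by
  unfold pvRR
  rw [pvRep_sA_append]
  exact pvYWM_cons (by decide) (by decide) (by decide) _

theorem pvRR_sY (u : List Char) : pvRR ('y'::'e'::u) = ' ' :: pvRR u := by
  unfold pvRR
  rw [pvRep_step_neg (old := ['a','y','a']) _ (by simp [List.isPrefixOf])]
  rw [pvRep_step_neg (old := ['a','y','a']) _ (by simp [List.isPrefixOf])]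
  rw [show ('y'::'e':: pvRep ['a','y','a'] [' '] u) = ['y','e'] ++ pvRep ['a','y','a'] [' '] u from rfl,
      pvRep_append]
  simp only [List.singleton_append]
  rw [pvRep_cons_ne _ (by decide), pvRep_cons_ne _ (by decide)]

theorem pvRR_sW (u : List Char) : pvRR ('w'::'o'::'o'::u) = ' ' :: pvRR u := by
  unfold pvRR
  rw [pvRep_step_neg (old := ['a','y','a']) _ (by simp [List.isPrefixOf])]
  rw [pvRep_step_neg (old := ['a','y','a']) _ (by simp [List.isPrefixOf])]
  rw [pvRep_step_neg (old := ['a','y','a']) _ (by simp [List.isPrefixOf])]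
  rw [pvRep_step_neg (old := ['y','e']) _ (by simp [List.isPrefixOf])]
  rw [pvRep_step_neg (old := ['y','e']) _ (by simp [List.isPrefixOf])]
  rw [pvRep_step_neg (old := ['y','e']) _ (by simp [List.isPrefixOf])]
  rw [show ('w'::'o'::'o':: pvRep ['y','e'] [' '] (pvRep ['a','y','a'] [' '] u)) =
        ['w','o','o'] ++ pvRep ['y','e'] [' '] (pvRep ['a','y','a'] [' '] u) from rfl,
      pvRep_append]
  simp only [List.singleton_append]
  rw [pvRep_cons_ne _ (by decide)]

theorem pvRR_sM (u : List Char) (hya : ['y','a'].isPrefixOf u = false) :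
    pvRR ('m'::'a'::u) = ' ' :: pvRR u := by
  unfold pvRR
  rw [pvRep_step_neg (old := ['a','y','a']) _ (by simp [List.isPrefixOf])]
  rw [pvRep_step_neg (old := ['a','y','a']) _ (by simp [List.isPrefixOf, hya])]
  rw [pvRep_step_neg (old := ['y','e']) _ (by simp [List.isPrefixOf])]
  rw [pvRep_step_neg (old := ['y','e']) _ (by simp [List.isPrefixOf])]
  rw [pvRep_step_neg (old := ['w','o','o']) _ (by simp [List.isPrefixOf])]
  rw [pvRep_step_neg (old := ['w','o','o']) _ (by simp [List.isPrefixOf])]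
  rw [show ('m'::'a':: pvRep ['w','o','o'] [' '] (pvRep ['y','e'] [' '] (pvRep ['a','y','a'] [' '] u))) =
        ['m','a'] ++ pvRep ['w','o','o'] [' '] (pvRep ['y','e'] [' '] (pvRep ['a','y','a'] [' '] u)) from rfl,
      pvRep_append]
  simp only [List.singleton_append]

theorem pvPrefix_single_false {a : Char} {x : List Char} (h : ¬ x.head? = some a) :
    ([a].isPrefixOf x) = false := by
  cases h' : [a].isPrefixOf x
  · rfl
  · exact absurd (pvPrefix_single.1 h') h

theorem pvRR_blank_a {r : List Char} (h : ['a','y','a'].isPrefixOf ('a'::r) = false) :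
    pvBlank (pvRR ('a'::r)) = false := by
  unfold pvRR
  rw [pvRep_step_neg _ h]
  rw [pvYWM_cons (by decide) (by decide) (by decide)]
  exact pvBlank_head_false (by decide) _

theorem pvRR_blank_y {r : List Char} (h : ['y','e'].isPrefixOf ('y'::r) = false) :
    pvBlank (pvRR ('y'::r)) = false := by
  have h2 : ['e'].isPrefixOf r = false := by simpa [List.isPrefixOf] using h
  have he : ¬ (pvRep ['a','y','a'] [' '] r).head? = some 'e' := by
    intro hh
    have := pvRep_head_ne (by decide) hh
    exact absurd (pvPrefix_single.2 this) (by simp [h2])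
  unfold pvRR
  rw [pvRep_cons_ne _ (by decide)]
  rw [pvRep_step_neg (old := ['y','e']) _ (by
    simp only [List.isPrefixOf, Bool.and_eq_false_iff]
    right; exact pvPrefix_single_false he)]
  rw [pvRep_cons_ne _ (by decide), pvRep_cons_ne _ (by decide)]
  exact pvBlank_head_false (by decide) _

theorem pvRR_blank_w {r : List Char} (h : ['w','o','o'].isPrefixOf ('w'::r) = false) :
    pvBlank (pvRR ('w'::r)) = false := by
  have h2 : ['o','o'].isPrefixOf r = false := by simpa [List.isPrefixOf] using h
  have hoo : ['o','o'].isPrefixOf (pvRep ['y','e'] [' '] (pvRep ['a','y','a'] [' '] r)) = false := by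
    cases hx : ['o','o'].isPrefixOf (pvRep ['y','e'] [' '] (pvRep ['a','y','a'] [' '] r))
    · rfl
    · exfalso
      obtain ⟨v, hv⟩ := List.isPrefixOf_iff_prefix.1 hx
      have hh1 : (pvRep ['y','e'] [' '] (pvRep ['a','y','a'] [' '] r)).head? = some 'o' := by
        rw [← hv]; rfl
      have hr : r.head? = some 'o' := pvRep_head_ne (by decide) (pvRep_head_ne (by decide) hh1)
      obtain ⟨r2, rfl⟩ : ∃ r2, r = 'o'::r2 := by
        cases r with
        | nil => simp at hr
        | cons a t => simp at hr; exact ⟨t, by rw [hr]⟩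
      rw [pvRep_cons_ne _ (by decide), pvRep_cons_ne _ (by decide)] at hv
      have hh2 : (pvRep ['y','e'] [' '] (pvRep ['a','y','a'] [' '] r2)).head? = some 'o' := by
        have htl := congrArg List.tail hv
        simp at htl
        rw [← htl]; rfl
      have hr2 : r2.head? = some 'o' := pvRep_head_ne (by decide) (pvRep_head_ne (by decide) hh2)
      have : ['o','o'].isPrefixOf ('o'::r2) = true := by
        simp [List.isPrefixOf, pvPrefix_single.2 hr2]
      simp [this] at h2
  unfold pvRR
  rw [pvRep_cons_ne _ (by decide), pvRep_cons_ne _ (by decide)]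
  rw [pvRep_step_neg (old := ['w','o','o']) _ (by
    simp only [List.isPrefixOf, Bool.and_eq_false_iff]
    right; simpa [List.isPrefixOf] using hoo)]
  rw [pvRep_cons_ne _ (by decide)]
  exact pvBlank_head_false (by decide) _

theorem pvRR_blank_m {r : List Char} (h : ['m','a'].isPrefixOf ('m'::r) = false) :
    pvBlank (pvRR ('m'::r)) = false := by
  have h2 : ['a'].isPrefixOf r = false := by simpa [List.isPrefixOf] using h
  have ha : ¬ (pvRep ['w','o','o'] [' '] (pvRep ['y','e'] [' '] (pvRep ['a','y','a'] [' '] r))).head? = some 'a' := by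
    intro hh
    have := pvRep_head_ne (by decide) (pvRep_head_ne (by decide) (pvRep_head_ne (by decide) hh))
    exact absurd (pvPrefix_single.2 this) (by simp [h2])
  unfold pvRR
  rw [pvRep_cons_ne _ (by decide), pvRep_cons_ne _ (by decide), pvRep_cons_ne _ (by decide)]
  rw [pvRep_step_neg (old := ['m','a']) _ (by
    simp only [List.isPrefixOf, Bool.and_eq_false_iff]
    right; exact pvPrefix_single_false ha)]
  exact pvBlank_head_false (by decide) _

theorem pvIsIn_cons {d : Char} {p : List Char} {c : Char} {r : List Char} (h : d ≠ c) :
    PySem.Chars.isIn (d::p) (c::r) = PySem.Chars.isIn (d::p) r := by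
  rw [Bool.eq_iff_iff, PySem.Chars.isIn_iff_infix, PySem.Chars.isIn_iff_infix, List.infix_cons_iff]
  constructor
  · rintro (hp | hi)
    · exact absurd (List.cons_prefix_cons.1 hp).1 h
    · exact hi
  · exact Or.inr

theorem pvNoCant_cons {c : Char} (ha : c ≠ 'a') (hy : c ≠ 'y') (hw : c ≠ 'w') (hm : c ≠ 'm')
    (r : List Char) : pvNoCant (c::r) = pvNoCant r := by
  unfold pvNoCant
  rw [pvIsIn_cons (Ne.symm ha), pvIsIn_cons (Ne.symm hy), pvIsIn_cons (Ne.symm hw),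
      pvIsIn_cons (Ne.symm hm)]

theorem pvBlank_cons_space (x : List Char) : pvBlank (' '::x) = pvBlank x := by
  simp [pvBlank]

theorem pvBlank_RR_maya (v : List Char) :
    pvBlank (pvRR ('m'::'a'::'y'::'a'::v)) = false := by
  unfold pvRR
  rw [pvRep_step_neg (old := ['a','y','a']) _ (by simp [List.isPrefixOf])]
  rw [pvRep_sA_append]
  rw [pvRep_step_neg (old := ['y','e']) _ (by simp [List.isPrefixOf])]
  rw [pvRep_step_neg (old := ['y','e']) _ (by simp [List.isPrefixOf])]
  rw [pvRep_step_neg (old := ['w','o','o']) _ (by simp [List.isPrefixOf])]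
  rw [pvRep_step_neg (old := ['w','o','o']) _ (by simp [List.isPrefixOf])]
  rw [pvRep_step_neg (old := ['m','a']) _ (by simp [List.isPrefixOf])]
  exact pvBlank_head_false (by decide) _

theorem pv_main : ∀ n (l : List Char) (prev : Option (List Char)), l.length ≤ n →
    (prev = none ∨ prev = some ['a','y','a'] ∨ prev = some ['y','e'] ∨
     prev = some ['w','o','o'] ∨ prev = some ['m','a']) →
    pvValid l prev = (pvNoCant l && pvPrevOk prev l && pvBlank (pvRR l)) := by
  intro n
  induction n with
  | zero =>
    intro l prev hlen hprev
    have hl : l = [] := by cases l <;> simp_all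
    subst hl
    have h1 : pvValid [] prev = true := by simp [pvValid]
    have h2 : pvRR [] = [] := by simp [pvRR, pvRep]
    rw [h1, h2]
    rcases hprev with rfl | rfl | rfl | rfl | rfl <;> decide
  | succ n ih =>
    intro l prev hlen hprev
    cases l with
    | nil =>
      have h1 : pvValid [] prev = true := by simp [pvValid]
      have h2 : pvRR [] = [] := by simp [pvRR, pvRep]
      rw [h1, h2]
      rcases hprev with rfl | rfl | rfl | rfl | rfl <;> decide
    | cons c r =>
      simp only [List.length_cons] at hlen
      by_cases hsp : c = ' '
      · subst hsp
        have hL : pvValid (' '::r) prev = pvValid r none := by rw [pvValid]; simp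
        rw [hL, ih r none (by omega) (Or.inl rfl),
            pvNoCant_cons (by decide) (by decide) (by decide) (by decide),
            pvRR_cons (by decide) (by decide) (by decide) (by decide), pvBlank_cons_space]
        rcases hprev with rfl | rfl | rfl | rfl | rfl <;> simp [pvPrevOk, List.isPrefixOf]
      by_cases hca : c = 'a'
      · subst hca
        by_cases hpre : ['a','y','a'].isPrefixOf ('a'::r) = true
        · obtain ⟨u, hu⟩ := List.isPrefixOf_iff_prefix.1 hpre
          obtain rfl : r = 'y'::'a'::u := by
            have := hu.symm; simp at this; exact this
          by_cases hpeq : prev = some ['a','y','a']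
          · subst hpeq
            have hL : pvValid ('a'::'y'::'a'::u) (some ['a','y','a']) = false := by
              rw [pvValid]; simp [pvSylOf]
            rw [hL]
            simp [pvPrevOk, List.isPrefixOf]
          · have hpeq' : ¬ (some ['a','y','a'] = prev) := fun hh => hpeq hh.symm
            have hL : pvValid ('a'::'y'::'a'::u) prev = pvValid u (some ['a','y','a']) := by
              rw [pvValid]; simp [pvSylOf, hpeq', List.isPrefixOf]
            rw [hL, ih u (some ['a','y','a']) (by simp at hlen; omega) (by tauto),
                show ('a'::'y'::'a'::u) = ['a','y','a'] ++ u from rfl]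
            have hpo : pvPrevOk prev (['a','y','a'] ++ u) = true := by
              rcases hprev with rfl | rfl | rfl | rfl | rfl
              · rfl
              · exact absurd rfl hpeq
              all_goals simp [pvPrevOk, List.isPrefixOf]
            rw [hpo, show pvRR (['a','y','a'] ++ u) = ' ' :: pvRR u from pvRR_sA u, pvBlank_cons_space]
            by_cases hb : pvBlank (pvRR u) = true
            · rw [pvNoCant_split_A u hb, hb]
              simp [pvPrevOk, Bool.and_assoc]
            · have hb' : pvBlank (pvRR u) = false := Bool.eq_false_iff.2 hb
              rw [hb']
              simp
        · have hpre' : ['a','y','a'].isPrefixOf ('a'::r) = false := Bool.eq_false_iff.2 hpre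
          have hL : pvValid ('a'::r) prev = false := by
            rw [pvValid]; simp [pvSylOf, hpre']
          rw [hL, pvRR_blank_a hpre', Bool.and_false]
      by_cases hcy : c = 'y'
      · subst hcy
        by_cases hpre : ['y','e'].isPrefixOf ('y'::r) = true
        · obtain ⟨u, hu⟩ := List.isPrefixOf_iff_prefix.1 hpre
          obtain rfl : r = 'e'::u := by
            have := hu.symm; simp at this; exact this
          by_cases hpeq : prev = some ['y','e']
          · subst hpeq
            have hL : pvValid ('y'::'e'::u) (some ['y','e']) = false := by
              rw [pvValid]; simp [pvSylOf]
            rw [hL]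
            simp [pvPrevOk, List.isPrefixOf]
          · have hpeq' : ¬ (some ['y','e'] = prev) := fun hh => hpeq hh.symm
            have hL : pvValid ('y'::'e'::u) prev = pvValid u (some ['y','e']) := by
              rw [pvValid]; simp [pvSylOf, hpeq', List.isPrefixOf]
            rw [hL, ih u (some ['y','e']) (by simp at hlen; omega) (by tauto),
                show ('y'::'e'::u) = ['y','e'] ++ u from rfl]
            have hpo : pvPrevOk prev (['y','e'] ++ u) = true := by
              rcases hprev with rfl | rfl | rfl | rfl | rfl
              · rfl
              · simp [pvPrevOk, List.isPrefixOf]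
              · exact absurd rfl hpeq
              all_goals simp [pvPrevOk, List.isPrefixOf]
            rw [hpo, show pvRR (['y','e'] ++ u) = ' ' :: pvRR u from pvRR_sY u, pvBlank_cons_space,
                pvNoCant_split_Y u]
            by_cases hb : pvBlank (pvRR u) = true
            · rw [hb]; simp [pvPrevOk]
            · rw [Bool.eq_false_iff.2 hb]; simp
        · have hpre' : ['y','e'].isPrefixOf ('y'::r) = false := Bool.eq_false_iff.2 hpre
          have hL : pvValid ('y'::r) prev = false := by
            rw [pvValid]; simp [pvSylOf, hpre']
          rw [hL, pvRR_blank_y hpre', Bool.and_false]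
      by_cases hcw : c = 'w'
      · subst hcw
        by_cases hpre : ['w','o','o'].isPrefixOf ('w'::r) = true
        · obtain ⟨u, hu⟩ := List.isPrefixOf_iff_prefix.1 hpre
          obtain rfl : r = 'o'::'o'::u := by
            have := hu.symm; simp at this; exact this
          by_cases hpeq : prev = some ['w','o','o']
          · subst hpeq
            have hL : pvValid ('w'::'o'::'o'::u) (some ['w','o','o']) = false := by
              rw [pvValid]; simp [pvSylOf]
            rw [hL]
            simp [pvPrevOk, List.isPrefixOf]
          · have hpeq' : ¬ (some ['w','o','o'] = prev) := fun hh => hpeq hh.symm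
            have hL : pvValid ('w'::'o'::'o'::u) prev = pvValid u (some ['w','o','o']) := by
              rw [pvValid]; simp [pvSylOf, hpeq', List.isPrefixOf]
            rw [hL, ih u (some ['w','o','o']) (by simp at hlen; omega) (by tauto),
                show ('w'::'o'::'o'::u) = ['w','o','o'] ++ u from rfl]
            have hpo : pvPrevOk prev (['w','o','o'] ++ u) = true := by
              rcases hprev with rfl | rfl | rfl | rfl | rfl
              · rfl
              · simp [pvPrevOk, List.isPrefixOf]
              · simp [pvPrevOk, List.isPrefixOf]
              · exact absurd rfl hpeq
              · simp [pvPrevOk, List.isPrefixOf]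
            rw [hpo, show pvRR (['w','o','o'] ++ u) = ' ' :: pvRR u from pvRR_sW u, pvBlank_cons_space,
                pvNoCant_split_W u]
            by_cases hb : pvBlank (pvRR u) = true
            · rw [hb]; simp [pvPrevOk]
            · rw [Bool.eq_false_iff.2 hb]; simp
        · have hpre' : ['w','o','o'].isPrefixOf ('w'::r) = false := Bool.eq_false_iff.2 hpre
          have hL : pvValid ('w'::r) prev = false := by
            rw [pvValid]; simp [pvSylOf, hpre']
          rw [hL, pvRR_blank_w hpre', Bool.and_false]
      by_cases hcm : c = 'm'
      · subst hcm
        by_cases hpre : ['m','a'].isPrefixOf ('m'::r) = true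
        · obtain ⟨u, hu⟩ := List.isPrefixOf_iff_prefix.1 hpre
          obtain rfl : r = 'a'::u := by
            have := hu.symm; simp at this; exact this
          by_cases hpeq : prev = some ['m','a']
          · subst hpeq
            have hL : pvValid ('m'::'a'::u) (some ['m','a']) = false := by
              rw [pvValid]; simp [pvSylOf]
            rw [hL]
            simp [pvPrevOk, List.isPrefixOf]
          · have hpeq' : ¬ (some ['m','a'] = prev) := fun hh => hpeq hh.symm
            have hL : pvValid ('m'::'a'::u) prev = pvValid u (some ['m','a']) := by
              rw [pvValid]; simp [pvSylOf, hpeq', List.isPrefixOf]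
            by_cases hya : ['y','a'].isPrefixOf u = true
            · obtain ⟨v, hv⟩ := List.isPrefixOf_iff_prefix.1 hya
              obtain rfl : u = 'y'::'a'::v := by
                have := hv.symm; simp at this; exact this
              have hL2 : pvValid ('y'::'a'::v) (some ['m','a']) = false := by
                rw [pvValid]; simp [pvSylOf, List.isPrefixOf]
              rw [hL, hL2, pvBlank_RR_maya v, Bool.and_false]
            · have hya' : ['y','a'].isPrefixOf u = false := Bool.eq_false_iff.2 hya
              rw [hL, ih u (some ['m','a']) (by simp at hlen; omega) (by tauto),
                  show ('m'::'a'::u) = ['m','a'] ++ u from rfl]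
              have hpo : pvPrevOk prev (['m','a'] ++ u) = true := by
                rcases hprev with rfl | rfl | rfl | rfl | rfl
                · rfl
                · simp [pvPrevOk, List.isPrefixOf]
                · simp [pvPrevOk, List.isPrefixOf]
                · simp [pvPrevOk, List.isPrefixOf]
                · exact absurd rfl hpeq
              rw [hpo, show pvRR (['m','a'] ++ u) = ' ' :: pvRR u from pvRR_sM u hya', pvBlank_cons_space,
                  pvNoCant_split_M u hya']
              by_cases hb : pvBlank (pvRR u) = true
              · rw [hb]; simp [pvPrevOk]
              · rw [Bool.eq_false_iff.2 hb]; simp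
        · have hpre' : ['m','a'].isPrefixOf ('m'::r) = false := Bool.eq_false_iff.2 hpre
          have hL : pvValid ('m'::r) prev = false := by
            rw [pvValid]; simp [pvSylOf, hpre']
          rw [hL, pvRR_blank_m hpre', Bool.and_false]
      -- remaining characters: no syllable starts with c
      have hL : pvValid (c::r) prev = false := by
        have hnone : pvSylOf c = none := by simp [pvSylOf, hca, hcy, hcw, hcm]
        rw [pvValid, if_neg hsp]
        split
        · rfl
        · next s h => exact absurd h (by simp [hnone])
      rw [hL, pvRR_cons hca hcy hcw hcm, pvBlank_head_false hsp, Bool.and_false]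

theorem pvCan_eq (w : List Char) :
    ([['a','y','a','a','y','a'], ['y','e','y','e'], ['w','o','o','w','o','o'], ['m','a','m','a']].foldl
      (fun can no => if PySem.Chars.isIn no w then false else can) true) = pvNoCant w := by
  simp only [List.foldl]
  cases h1 : PySem.Chars.isIn ['a','y','a','a','y','a'] w <;>
  cases h2 : PySem.Chars.isIn ['y','e','y','e'] w <;>
  cases h3 : PySem.Chars.isIn ['w','o','o','w','o','o'] w <;>
  cases h4 : PySem.Chars.isIn ['m','a','m','a'] w <;>
  simp [pvNoCant, h1, h2, h3, h4]

theorem pvWord_eq (ans : Int) (word : String) :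
    (if ([['a','y','a','a','y','a'], ['y','e','y','e'], ['w','o','o','w','o','o'], ['m','a','m','a']].foldl
          (fun can no => if PySem.Chars.isIn no word.toList then false else can) true)
     then pvBabyLoop [['a','y','a'], ['y','e'], ['w','o','o'], ['m','a']] word.toList ans else ans) =
    ans + (if pvValid word.toList none then 1 else 0) := by
  rw [pvCan_eq, pvBabyLoop_eq,
      pv_main word.toList.length word.toList none le_rfl (Or.inl rfl)]
  cases h1 : pvNoCant word.toList <;> cases h2 : pvBlank (pvRR word.toList) <;> simp [pvPrevOk]

theorem solution_spec : Claim_equal_solution := by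
  intro babbling _
  unfold Spec_solution solution solution_alt
  exact PySem.List.foldl_congr_mem babbling _ _ 0 (fun a w _ => pvWord_eq a w)
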